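-- pv_equiv track=rewrite | github.com/pypi-data/pypi-mirror-74 | packages/xlist/xlist-0.0.4.tar.gz/xlist-0.0.4/xlist/elist.py | find_fst_valuepair_fstgtsnd_via_reversing
-- ===== SOURCE A (Python) =====
-- def find_fst_valuepair_fstgtsnd_via_reversing(arr):
--     lngth = len(arr)
--     for snd in range(lngth-1,0,-1):
--         fst = snd - 1
--         if(arr[fst]>arr[snd]):
--             return((arr[fst],arr[snd]))
--         else:
--             pass
--     return(None)
-- ===== SOURCE B (Python) =====
-- def find_fst_valuepair_fstgtsnd_via_reversing(arr):
--     cand = [i for i in range(len(arr) - 1) if arr[i] > arr[i + 1]]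
--     if cand:
--         j = cand[-1]
--         return (arr[j], arr[j + 1])
--     return None
-- ===== Notes on version B (the rewrite author's own statement) =====
-- stated objective: alternative
-- what changed: A scans backwards from the end with an early return at the first descending adjacent pair; B does one forward pass that materialises the list of all candidate indices i with arr[i] > arr[i+1] and then returns the pair at the last candidate (or None).
import Mathlib
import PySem

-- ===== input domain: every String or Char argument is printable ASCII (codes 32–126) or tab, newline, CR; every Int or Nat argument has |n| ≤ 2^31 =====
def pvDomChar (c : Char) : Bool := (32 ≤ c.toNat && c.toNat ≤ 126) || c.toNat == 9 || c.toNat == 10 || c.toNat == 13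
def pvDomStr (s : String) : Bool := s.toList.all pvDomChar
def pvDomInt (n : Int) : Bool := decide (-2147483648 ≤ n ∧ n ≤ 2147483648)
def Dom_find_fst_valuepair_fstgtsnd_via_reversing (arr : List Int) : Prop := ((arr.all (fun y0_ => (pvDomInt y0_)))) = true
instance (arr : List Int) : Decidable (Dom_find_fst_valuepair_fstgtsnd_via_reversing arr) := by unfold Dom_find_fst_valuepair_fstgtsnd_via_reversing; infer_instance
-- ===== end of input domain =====

-- B replaces A's backward scan with early return by a forward pass that materialises all descending-pair indices and picks the last (alternative decomposition, same cost).


-- ===== PORT A =====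
-- A: scan snd = len-1 .. 1 backwards, return the first adjacent pair with arr[snd-1] > arr[snd]
def pvLoopA (arr : List Int) : List Int → Option (Int × Int)
  | [] => none
  | snd :: rest =>
    let fst := snd - 1
    if PySem.List.pyGetD arr fst 0 > PySem.List.pyGetD arr snd 0 then
      some (PySem.List.pyGetD arr fst 0, PySem.List.pyGetD arr snd 0)
    else pvLoopA arr rest

def find_fst_valuepair_fstgtsnd_via_reversing (arr : List Int) : Option (Int × Int) :=
  let lngth : Int := arr.length
  pvLoopA arr (PySem.List.pyRange (lngth - 1) 0 (-1))

-- ===== PORT B =====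
-- B: one forward pass collects every index i with arr[i] > arr[i+1]; return the pair at the last candidate
def find_fst_valuepair_fstgtsnd_via_reversing_alt (arr : List Int) : Option (Int × Int) :=
  let cand := (PySem.List.pyRange 0 ((arr.length : Int) - 1) 1).filter
      (fun i => PySem.List.pyGetD arr i 0 > PySem.List.pyGetD arr (i + 1) 0)
  match cand.getLast? with
  | some j => some (PySem.List.pyGetD arr j 0, PySem.List.pyGetD arr (j + 1) 0)
  | none => none

-- ===== PRECONDITION & SPEC =====
def Spec_find_fst_valuepair_fstgtsnd_via_reversing (arr : List Int) (out : Option (Int × Int)) : Prop := out = find_fst_valuepair_fstgtsnd_via_reversing_alt arr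
instance (arr : List Int) (out : Option (Int × Int)) : Decidable (Spec_find_fst_valuepair_fstgtsnd_via_reversing arr out) := by unfold Spec_find_fst_valuepair_fstgtsnd_via_reversing; infer_instance

-- ===== CLAIM (what is proved, stated in full; the proofs are below) =====
def Claim_equal_find_fst_valuepair_fstgtsnd_via_reversing : Prop := ∀ (arr : List Int), Dom_find_fst_valuepair_fstgtsnd_via_reversing arr → Spec_find_fst_valuepair_fstgtsnd_via_reversing arr (find_fst_valuepair_fstgtsnd_via_reversing arr)

-- ===== LEMMAS AND PROOFS =====
-- A's early-return loop over an index list is find? followed by building the pair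
theorem pvLoopA_eq_find (arr : List Int) (l : List Int) :
    pvLoopA arr l
      = (l.find? (fun snd => decide (PySem.List.pyGetD arr (snd - 1) 0 > PySem.List.pyGetD arr snd 0))).map
          (fun snd => (PySem.List.pyGetD arr (snd - 1) 0, PySem.List.pyGetD arr snd 0)) := by
  induction l with
  | nil => rfl
  | cons snd rest ih =>
    simp only [pvLoopA, List.find?]
    by_cases h : PySem.List.pyGetD arr (snd - 1) 0 > PySem.List.pyGetD arr snd 0 <;>
      simp [h, ih]

-- the descending range [m-1, …, 1] is the reverse of the shifted forward range [0, …, m-2]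
theorem pvRange_down_eq (m : Nat) :
    PySem.List.pyRange ((m : Int) - 1) 0 (-1)
      = ((PySem.List.pyRange 0 ((m : Int) - 1) 1).map (fun i => i + 1)).reverse := by
  rw [PySem.List.pyRange_one]
  simp only [PySem.List.pyRange]
  have h0 : ¬ ((-1 : Int) = 0) := by decide
  have h1 : ¬ ((0 : Int) < -1) := by decide
  simp only [if_neg h0, if_neg h1]
  have hcnt : (if (0 : Int) < (m : Int) - 1 then (((m : Int) - 1 - 0 + - -1 - 1) / - -1).toNat else 0)
      = ((m : Int) - 1).toNat := by
    have he : ((m : Int) - 1 - 0 + - -1 - 1) / - -1 = (m : Int) - 1 := by norm_num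
    rw [he]
    split_ifs with h
    · rfl
    · omega
  rw [hcnt]
  apply List.ext_getElem
  · simp
  · intro i h1' h2'
    simp only [List.getElem_map, List.getElem_reverse, List.getElem_range,
      List.length_map, List.length_range] at h1' h2' ⊢
    omega

theorem find_fst_valuepair_fstgtsnd_via_reversing_eq_alt (arr : List Int) :
    find_fst_valuepair_fstgtsnd_via_reversing arr = find_fst_valuepair_fstgtsnd_via_reversing_alt arr := by
  unfold find_fst_valuepair_fstgtsnd_via_reversing find_fst_valuepair_fstgtsnd_via_reversing_alt
  rw [pvLoopA_eq_find, pvRange_down_eq, ← List.head?_filter, List.filter_reverse,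
    List.head?_reverse, List.filter_map, List.getLast?_map, Option.map_map]
  have hpred : ((fun snd => decide (PySem.List.pyGetD arr (snd - 1) 0 > PySem.List.pyGetD arr snd 0))
        ∘ (fun i : Int => i + 1))
      = (fun i => decide (PySem.List.pyGetD arr i 0 > PySem.List.pyGetD arr (i + 1) 0)) := by
    funext i
    simp [Function.comp, add_sub_cancel_right]
  have hpair : ((fun snd => (PySem.List.pyGetD arr (snd - 1) 0, PySem.List.pyGetD arr snd 0))
        ∘ (fun i : Int => i + 1))
      = (fun j : Int => (PySem.List.pyGetD arr j 0, PySem.List.pyGetD arr (j + 1) 0)) := by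
    funext j
    simp [Function.comp, add_sub_cancel_right]
  rw [hpred, hpair]
  cases hG : ((PySem.List.pyRange 0 ((arr.length : Int) - 1) 1).filter
      (fun i => decide (PySem.List.pyGetD arr i 0 > PySem.List.pyGetD arr (i + 1) 0))).getLast? with
  | none => simp only [hG, Option.map_none]
  | some j => simp only [hG, Option.map_some]

-- ===== VERDICT (by name: the statement is the Claim_ definition above) =====
theorem find_fst_valuepair_fstgtsnd_via_reversing_spec : Claim_equal_find_fst_valuepair_fstgtsnd_via_reversing := by
  intro arr _
  unfold Spec_find_fst_valuepair_fstgtsnd_via_reversing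
  exact find_fst_valuepair_fstgtsnd_via_reversing_eq_alt arr
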